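-- pv_equiv track=rewrite | github.com/DavideBraga/master-degree-CS | masterDegree/FirstYear/SecondSemestr/ComplessitàAlgoritmi/rtal/resolved/poldo_mania/poldo_mania.py | calc_max_ending
-- ===== SOURCE A (Python) =====
-- def calc_max_ending(arr):
--     bins = []
--     res = [0 for _ in range(len(arr))]
--     for x in range(len(arr)):
--         if not bins or arr[x] > bins[-1]:
--             bins.append(arr[x])
--             res[x] = len(bins)
--         else:
--             lo, hi = 0, len(bins) - 1
--             while lo < hi:
--                 mid = (lo + hi) // 2
--                 if bins[mid] < arr[x]:
--                     lo = mid + 1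
--                 else:
--                     hi = mid
--             bins[hi] = arr[x]
--             res[x] = hi + 1
--     return res
-- ===== SOURCE B (Python) =====
-- def calc_max_ending(arr):
--     res = []
--     for v in arr:
--         best = 0
--         for w, r in zip(arr, res):
--             if w < v and r > best:
--                 best = r
--         res.append(best + 1)
--     return res
-- ===== Notes on version B (the rewrite author's own statement) =====
-- stated objective: simpler
-- what changed: Replaced the patience-sorting tails array with hand-written binary search by the classic quadratic DP: each element's length is 1 + the best length among earlier, strictly smaller elements.
import Mathlib
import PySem

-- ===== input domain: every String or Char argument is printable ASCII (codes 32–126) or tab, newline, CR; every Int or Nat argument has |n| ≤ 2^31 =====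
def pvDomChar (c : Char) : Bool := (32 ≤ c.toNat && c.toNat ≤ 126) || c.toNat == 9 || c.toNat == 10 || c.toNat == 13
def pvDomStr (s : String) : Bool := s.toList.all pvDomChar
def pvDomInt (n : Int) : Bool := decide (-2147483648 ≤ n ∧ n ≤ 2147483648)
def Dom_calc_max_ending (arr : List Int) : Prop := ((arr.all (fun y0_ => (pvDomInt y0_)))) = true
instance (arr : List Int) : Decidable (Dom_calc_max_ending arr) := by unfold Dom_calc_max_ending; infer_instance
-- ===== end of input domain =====

-- B replaces A's patience-sorting tails array + hand-written binary search by the classic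
-- quadratic DP (length at x = 1 + best length among earlier strictly smaller elements): simpler, not faster.

-- ===== PORT A =====
-- the while-loop of A (binary search); terminates because hi - lo shrinks
def bsearchA (bins : List Int) (v : Int) (lo hi : Int) : Int :=
  if lo < hi then
    let mid := PySem.Int.floordiv (lo + hi) 2
    if PySem.List.pyGetD bins mid 0 < v then
      bsearchA bins v (mid + 1) hi
    else
      bsearchA bins v lo mid
  else hi
termination_by (hi - lo).toNat
decreasing_by
  · simp only [PySem.Int.floordiv_eq_ediv_of_pos (by norm_num : (0:Int) < 2)]
    omega
  · simp only [PySem.Int.floordiv_eq_ediv_of_pos (by norm_num : (0:Int) < 2)]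
    omega

-- the body of A's "for x in range(len(arr))" loop; state = (bins, res)
def stepA (arr : List Int) (st : List Int × List Int) (x : Int) : List Int × List Int :=
  let bins := st.1
  let res := st.2
  let ax := PySem.List.pyGetD arr x 0
  if bins.isEmpty || decide (PySem.List.pyGetD bins (-1) 0 < ax) then
    let bins' := bins ++ [ax]
    (bins', PySem.List.pySetD res x (bins'.length : Int))
  else
    let hi := bsearchA bins ax 0 (bins.length - 1)
    (PySem.List.pySetD bins hi ax, PySem.List.pySetD res x (hi + 1))

def calc_max_ending (arr : List Int) : List Int :=
  ((PySem.List.pyRange 0 arr.length 1).foldl (stepA arr)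
    ([], List.replicate arr.length 0)).2

-- ===== PORT B =====
-- inner loop of B: best value r among pairs (w, r) with w < v, starting from 0
def bestPrev (pairs : List (Int × Int)) (v : Int) : Int :=
  pairs.foldl (fun best wr => if wr.1 < v ∧ wr.2 > best then wr.2 else best) 0

def calc_max_ending_alt (arr : List Int) : List Int :=
  arr.foldl (fun res v => res ++ [bestPrev (arr.zip res) v + 1]) []

-- ===== PRECONDITION & SPEC =====
def Spec_calc_max_ending (arr : List Int) (out : List Int) : Prop := out = calc_max_ending_alt arr
instance (arr : List Int) (out : List Int) : Decidable (Spec_calc_max_ending arr out) := by unfold Spec_calc_max_ending; infer_instance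

-- ===== CLAIM (what is proved, stated in full; the proofs are below) =====
def Claim_equal_calc_max_ending : Prop := ∀ (arr : List Int), Dom_calc_max_ending arr → Spec_calc_max_ending arr (calc_max_ending arr)

-- ===== LEMMAS AND PROOFS =====

-- proof-side reformulation of B as a left fold carrying the processed prefix
def dpStep (st : List Int × List Int) (v : Int) : List Int × List Int :=
  (st.1 ++ [v], st.2 ++ [bestPrev (st.1.zip st.2) v + 1])

def dpPair (p : List Int) : List Int × List Int := p.foldl dpStep ([], [])

def dpl (p : List Int) : List Int := (dpPair p).2

-- number of entries of bins strictly below v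
def countLT (bins : List Int) (v : Int) : Nat :=
  (bins.filter (fun b => decide (b < v))).length

-- the loop invariant relating A's bins to B's dp values of the processed prefix
def InvA (p bins : List Int) : Prop :=
  bins.Pairwise (· < ·) ∧ ∀ v : Int, ((countLT bins v : Int)) = bestPrev (p.zip (dpl p)) v

lemma dpPair_spec (p : List Int) : ∀ st : List Int × List Int,
    p.foldl dpStep st = (st.1 ++ p, (p.foldl dpStep st).2) ∧
    ((p.foldl dpStep st).2).length = st.2.length + p.length := by
  induction p with
  | nil => intro st; simp
  | cons v t ih =>
    intro st
    have h := ih (dpStep st v)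
    simp only [List.foldl_cons] at *
    constructor
    · rw [(h.1)]; simp [dpStep]
    · rw [h.2]; simp [dpStep]; omega

lemma dpl_length (p : List Int) : (dpl p).length = p.length := by
  simpa using (dpPair_spec p ([], [])).2

lemma dpl_snoc (p : List Int) (v : Int) :
    dpl (p ++ [v]) = dpl p ++ [bestPrev (p.zip (dpl p)) v + 1] := by
  have h := (dpPair_spec p ([], [])).1
  unfold dpl dpPair
  rw [List.foldl_append]
  have hpair : p.foldl dpStep ([], []) = (p, dpl p) := by
    rw [h]; rfl
  rw [hpair]
  simp [dpStep]

lemma zip_append_right {α β : Type} (l : List α) (r : List β) (t : List α)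
    (h : r.length ≤ l.length) : (l ++ t).zip r = l.zip r := by
  induction r generalizing l with
  | nil => simp
  | cons b rs ih =>
    cases l with
    | nil => simp at h
    | cons a ls => simp at h ⊢; exact ih ls h

lemma altFold (arr : List Int) : ∀ (l p : List Int), arr = p ++ l →
    l.foldl (fun res v => res ++ [bestPrev (arr.zip res) v + 1]) (dpl p) = dpl (p ++ l) := by
  intro l
  induction l with
  | nil => intro p h; simp
  | cons v t ih =>
    intro p h
    have hzip : arr.zip (dpl p) = p.zip (dpl p) := by
      rw [h]; exact zip_append_right p (dpl p) (v :: t) (by rw [dpl_length])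
    simp only [List.foldl_cons, hzip, ← dpl_snoc]
    have := ih (p ++ [v]) (by simpa using h)
    simpa using this

lemma alt_eq_dpl (arr : List Int) : calc_max_ending_alt arr = dpl arr := by
  have h := altFold arr arr [] rfl
  simpa [calc_max_ending_alt, dpl, dpPair] using h

lemma bestPrev_snoc (l : List (Int × Int)) (w r v : Int) :
    bestPrev (l ++ [(w, r)]) v = if w < v ∧ r > bestPrev l v then r else bestPrev l v := by
  simp [bestPrev, List.foldl_append]

lemma countLT_le_length (bins : List Int) (v : Int) : countLT bins v ≤ bins.length := by
  simpa [countLT] using List.length_filter_le _ bins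

lemma countLT_eq_of (v : Int) : ∀ (bins : List Int) (c : Nat), c ≤ bins.length →
    (∀ i (h : i < bins.length), i < c → bins[i] < v) →
    (∀ i (h : i < bins.length), c ≤ i → ¬ bins[i] < v) →
    countLT bins v = c := by
  intro bins
  induction bins with
  | nil => intro c hc _ _; simp only [List.length_nil, Nat.le_zero] at hc; simp [countLT, hc]
  | cons b t ih =>
    intro c hc h1 h2
    cases c with
    | zero =>
      have hb : ¬ b < v := by simpa using h2 0 (by simp) (by omega)
      have ht : countLT t v = 0 := by
        refine ih 0 (by omega) (by omega) ?_
        intro i hi _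
        simpa using h2 (i + 1) (by simpa using Nat.succ_lt_succ hi) (by omega)
      simp only [countLT, List.filter_cons] at ht ⊢
      simp [hb, ht]
    | succ c' =>
      have hb : b < v := by simpa using h1 0 (by simp) (by omega)
      have ht : countLT t v = c' := by
        refine ih c' (by simpa using hc) ?_ ?_
        · intro i hi hic
          simpa using h1 (i + 1) (by simpa using Nat.succ_lt_succ hi) (by omega)
        · intro i hi hic
          simpa using h2 (i + 1) (by simpa using Nat.succ_lt_succ hi) (by omega)
      simp only [countLT, List.filter_cons] at ht ⊢
      simp [hb, ht]

lemma sorted_countLT_iff (bins : List Int) (v : Int) (hs : bins.Pairwise (· < ·)) :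
    ∀ i (h : i < bins.length), (bins[i] < v ↔ i < countLT bins v) := by
  induction bins with
  | nil => intro i h; simp at h
  | cons b t ih =>
    rw [List.pairwise_cons] at hs
    intro i h
    by_cases hbv : b < v
    · cases i with
      | zero =>
        simp only [List.getElem_cons_zero, countLT, List.filter_cons]
        simp [hbv]
      | succ i =>
        have := ih hs.2 i (by simpa using h)
        simp only [List.getElem_cons_succ, countLT, List.filter_cons] at this ⊢
        simp only [hbv, decide_true, if_true] at *
        simp only [List.length_cons]
        constructor
        · intro hx; have := this.mp hx; omega
        · intro hx; exact this.mpr (by omega)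
    · have htz : t.filter (fun b => decide (b < v)) = [] := by
        rw [List.filter_eq_nil_iff]
        intro x hx
        have : b < x := hs.1 x hx
        simp; omega
      have hc : countLT (b :: t) v = 0 := by
        simp [countLT, hbv, htz]
      rw [hc]
      cases i with
      | zero => simpa using hbv
      | succ i =>
        simp only [List.getElem_cons_succ]
        have hit : i < t.length := by simpa using h
        have hbt : b < t[i] := hs.1 _ (List.getElem_mem hit)
        constructor
        · intro hx; omega
        · intro hx; omega

lemma pairwise_getElem {l : List Int} (h : l.Pairwise (· < ·)) {i j : Nat}
    (hij : i < j) (hj : j < l.length) : l[i]'(by omega) < l[j] := by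
  exact List.pairwise_iff_getElem.mp h i j (by omega) hj hij

lemma bsearchA_eq (bins : List Int) (v : Int) (hs : bins.Pairwise (· < ·)) :
    ∀ n : Nat, ∀ lo hi : Int, (hi - lo).toNat ≤ n → 0 ≤ lo → lo ≤ hi → hi < bins.length →
    (∀ i (h : i < bins.length), (i : Int) < lo → bins[i] < v) →
    (∀ i (h : i < bins.length), hi ≤ (i : Int) → ¬ bins[i] < v) →
    bsearchA bins v lo hi = (countLT bins v : Int) := by
  intro n
  induction n with
  | zero =>
    intro lo hi hn h0 hlh hhi hlow hhigh
    have hlo : lo = hi := by omega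
    rw [bsearchA]
    simp only [hlo, lt_irrefl, if_false]
    have : countLT bins v = hi.toNat := by
      refine countLT_eq_of v bins hi.toNat (by omega) ?_ ?_
      · intro i h hic; exact hlow i h (by omega)
      · intro i h hic; exact hhigh i h (by omega)
    rw [this]; omega
  | succ n ih =>
    intro lo hi hn h0 hlh hhi hlow hhigh
    rw [bsearchA]
    by_cases hcond : lo < hi
    · simp only [hcond, if_true]
      set mid := PySem.Int.floordiv (lo + hi) 2 with hmid
      have hmb : lo ≤ mid ∧ mid < hi := by
        rw [hmid, PySem.Int.floordiv_eq_ediv_of_pos (by norm_num : (0:Int) < 2)]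
        omega
      have hmednn : (0:Int) ≤ mid := by omega
      have hmlen : mid < (bins.length : Int) := by omega
      have hget : PySem.List.pyGetD bins mid 0 = bins[mid.toNat]'(by omega) :=
        PySem.List.pyGetD_eq_getElem _ _ hmednn hmlen
      by_cases hlt : PySem.List.pyGetD bins mid 0 < v
      · simp only [hlt, if_true]
        refine ih (mid + 1) hi (by omega) (by omega) (by omega) hhi ?_ hhigh
        intro i h hil
        have hile : (i : Int) ≤ mid := by omega
        rcases lt_or_eq_of_le hile with hcase | hcase
        · have : bins[i] < bins[mid.toNat]'(by omega) := pairwise_getElem hs (by omega) (by omega)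
          rw [hget] at hlt; omega
        · have : i = mid.toNat := by omega
          subst this; rw [hget] at hlt; exact hlt
      · simp only [hlt, if_false]
        refine ih lo mid (by omega) h0 (by omega) (by omega) hlow ?_
        intro i h hig
        rw [hget] at hlt
        rcases lt_or_eq_of_le hig with hcase | hcase
        · have : bins[mid.toNat]'(by omega) < bins[i] := pairwise_getElem hs (by omega) h
          omega
        · have : i = mid.toNat := by omega
          subst this; exact hlt
    · simp only [hcond, if_false]
      have hlo : lo = hi := by omega
      have : countLT bins v = hi.toNat := by
        refine countLT_eq_of v bins hi.toNat (by omega) ?_ ?_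
        · intro i h hic; exact hlow i h (by omega)
        · intro i h hic; exact hhigh i h (by omega)
      rw [this]; omega

lemma set_append_len {α : Type} (a b : List α) (r : α) :
    (a ++ b).set a.length r = a ++ b.set 0 r := by
  induction a with
  | nil => simp
  | cons x xs ih => simp [ih]

-- updating bins at position countLT bins v (append form) keeps sortedness and moves countLT one step
lemma update_append (bins : List Int) (v : Int) (hs : bins.Pairwise (· < ·))
    (hc : countLT bins v = bins.length) :
    (bins ++ [v]).Pairwise (· < ·) ∧
    ∀ w, countLT (bins ++ [v]) w =
      if v < w ∧ countLT bins w < countLT bins v + 1 then countLT bins v + 1 else countLT bins w := by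
  have hall : ∀ i (h : i < bins.length), bins[i] < v := by
    intro i h
    exact (sorted_countLT_iff bins v hs i h).mpr (by omega)
  constructor
  · rw [List.pairwise_append]
    refine ⟨hs, by simp, ?_⟩
    intro a ha b hb
    simp only [List.mem_singleton] at hb
    subst hb
    obtain ⟨i, hi, rfl⟩ := List.mem_iff_getElem.mp ha
    exact hall i hi
  · intro w
    have hcw := countLT_le_length bins w
    by_cases hvw : v < w
    · have hcond : v < w ∧ countLT bins w < countLT bins v + 1 := ⟨hvw, by omega⟩
      rw [if_pos hcond, hc]
      refine countLT_eq_of w (bins ++ [v]) (bins.length + 1) (by simp) ?_ (by intro i h hic; simp at h; omega)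
      intro i h hic
      by_cases hib : i < bins.length
      · rw [List.getElem_append_left hib]
        have := hall i hib; omega
      · have : i = bins.length := by simp at h; omega
        subst this
        simpa using hvw
    · rw [if_neg (by tauto)]
      refine countLT_eq_of w (bins ++ [v]) (countLT bins w) (by simp; omega) ?_ ?_
      · intro i h hic
        have hib : i < bins.length := by omega
        rw [List.getElem_append_left hib]
        exact (sorted_countLT_iff bins w hs i hib).mpr hic
      · intro i h hic
        by_cases hib : i < bins.length
        · rw [List.getElem_append_left hib]
          intro hlt
          have := (sorted_countLT_iff bins w hs i hib).mp hlt
          omega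
        · have : i = bins.length := by simp at h; omega
          subst this
          simpa using hvw

-- updating bins at position countLT bins v (overwrite form)
lemma update_set (bins : List Int) (v : Int) (hs : bins.Pairwise (· < ·))
    (hc : countLT bins v < bins.length) :
    (bins.set (countLT bins v) v).Pairwise (· < ·) ∧
    ∀ w, countLT (bins.set (countLT bins v) v) w =
      if v < w ∧ countLT bins w < countLT bins v + 1 then countLT bins v + 1 else countLT bins w := by
  set c := countLT bins v with hcdef
  have hlo : ∀ i (h : i < bins.length), i < c → bins[i] < v := by
    intro i h hic; exact (sorted_countLT_iff bins v hs i h).mpr hic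
  have hhi : ∀ i (h : i < bins.length), c ≤ i → v ≤ bins[i] := by
    intro i h hic
    have := (sorted_countLT_iff bins v hs i h); omega
  have hsort : (bins.set c v).Pairwise (· < ·) := by
    rw [List.pairwise_iff_getElem]
    intro i j hi hj hij
    simp only [List.length_set] at hi hj
    rw [List.getElem_set, List.getElem_set]
    rcases Nat.lt_trichotomy i c with h1 | h1 | h1
    · rw [if_neg (by omega)]
      by_cases h2 : c = j
      · rw [if_pos h2]; exact hlo i hi h1
      · rw [if_neg h2]; exact pairwise_getElem hs hij hj
    · rw [if_pos h1.symm]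
      rw [if_neg (by omega)]
      calc v ≤ bins[c]'(by omega) := hhi c (by omega) le_rfl
        _ < bins[j] := pairwise_getElem hs (by omega) hj
    · rw [if_neg (by omega), if_neg (by omega)]
      exact pairwise_getElem hs hij hj
  refine ⟨hsort, ?_⟩
  intro w
  have hcw := countLT_le_length bins w
  by_cases hvw : v < w
  · -- result is max (c+1) (countLT bins w)
    rw [show (if v < w ∧ countLT bins w < c + 1 then c + 1 else countLT bins w)
        = max (c + 1) (countLT bins w) by split_ifs <;> omega]
    refine countLT_eq_of w _ _ (by simp; omega) ?_ ?_
    · intro i h hic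
      simp only [List.length_set] at h
      rw [List.getElem_set]
      by_cases h2 : c = i
      · rw [if_pos h2]; exact hvw
      · rw [if_neg h2]
        rcases Nat.lt_or_ge i c with h3 | h3
        · have := hlo i h h3; omega
        · have hiw : i < countLT bins w := by omega
          exact (sorted_countLT_iff bins w hs i h).mpr hiw
    · intro i h hic
      simp only [List.length_set] at h
      rw [List.getElem_set, if_neg (by omega)]
      intro hlt
      have := (sorted_countLT_iff bins w hs i h).mp hlt
      omega
  · -- w ≤ v : count unchanged
    rw [if_neg (by tauto)]
    have hcwc : countLT bins w ≤ c := by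
      by_contra hcon
      have h1 : c < bins.length := hc
      have := (sorted_countLT_iff bins w hs c h1).mpr (by omega)
      have := hhi c h1 le_rfl
      omega
    refine countLT_eq_of w _ _ (by simp; omega) ?_ ?_
    · intro i h hic
      simp only [List.length_set] at h
      rw [List.getElem_set, if_neg (by omega)]
      exact (sorted_countLT_iff bins w hs i h).mpr hic
    · intro i h hic
      simp only [List.length_set] at h
      rw [List.getElem_set]
      by_cases h2 : c = i
      · rw [if_pos h2]; omega
      · rw [if_neg h2]
        intro hlt
        have := (sorted_countLT_iff bins w hs i h).mp hlt
        omega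

-- writing res[x] at position x = |p| splits the zero tail
lemma res_update (arr p rest : List Int) (v r : Int) (harr : arr = p ++ v :: rest) :
    (dpl p ++ List.replicate (arr.length - p.length) 0).set p.length r
      = (dpl p ++ [r]) ++ List.replicate (arr.length - (p.length + 1)) 0 := by
  have hn : arr.length = p.length + 1 + rest.length := by subst harr; simp; omega
  conv_lhs => rw [← dpl_length p]
  rw [set_append_len, dpl_length, hn]
  have h1 : p.length + 1 + rest.length - p.length = rest.length + 1 := by omega
  have h2 : p.length + 1 + rest.length - (p.length + 1) = rest.length := by omega
  rw [h1, h2, List.replicate_succ]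
  simp

-- invariant transfer given the counting property of the updated bins
lemma inv_next (p bins bins' : List Int) (v : Int) (hInv : InvA p bins)
    (hsort' : bins'.Pairwise (· < ·))
    (hcnt' : ∀ w, countLT bins' w =
      if v < w ∧ countLT bins w < countLT bins v + 1 then countLT bins v + 1 else countLT bins w) :
    InvA (p ++ [v]) bins' := by
  refine ⟨hsort', ?_⟩
  intro w
  rw [dpl_snoc, List.zip_append (by rw [dpl_length])]
  simp only [List.zip_cons_cons, List.zip_nil_right]
  rw [bestPrev_snoc, hcnt' w, ← hInv.2 w, ← hInv.2 v]
  split_ifs <;> push_cast <;> omega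

-- one iteration of A's loop preserves the invariant and writes B's dp value
lemma stepA_preserves (arr p rest : List Int) (v : Int) (bins : List Int)
    (harr : arr = p ++ v :: rest) (hInv : InvA p bins) :
    ∃ bins', stepA arr (bins, dpl p ++ List.replicate (arr.length - p.length) 0) ((p.length : Nat) : Int)
        = (bins', dpl (p ++ [v]) ++ List.replicate (arr.length - (p.length + 1)) 0)
      ∧ InvA (p ++ [v]) bins' := by
  obtain ⟨hsort, hcnt⟩ := hInv
  have hklt : p.length < arr.length := by subst harr; simp
  have hax : PySem.List.pyGetD arr ((p.length : Nat) : Int) 0 = v := by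
    rw [PySem.List.pyGetD_eq_getElem _ _ (Int.natCast_nonneg _) (by exact_mod_cast hklt)]
    simp only [Int.toNat_natCast]
    subst harr
    rw [List.getElem_append_right le_rfl]
    simp
  by_cases hcond : (bins.isEmpty || decide (PySem.List.pyGetD bins (-1) 0 < v)) = true
  · -- append branch: every bin is below v
    have hclen : countLT bins v = bins.length := by
      by_cases hbe : bins = []
      · subst hbe; simp [countLT]
      · simp only [Bool.or_eq_true, List.isEmpty_iff, decide_eq_true_eq, hbe, false_or] at hcond
        rw [PySem.List.pyGetD_neg_one _ _ hbe, List.getLast_eq_getElem] at hcond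
        refine countLT_eq_of v bins bins.length le_rfl ?_ (by intro i h hic; omega)
        intro i h _
        rcases Nat.lt_or_ge i (bins.length - 1) with hi | hi
        · have := pairwise_getElem hsort hi (by omega)
          omega
        · have : i = bins.length - 1 := by omega
          subst this; exact hcond
    refine ⟨bins ++ [v], ?_, ?_⟩
    · simp only [stepA, hax, hcond, if_true]
      refine Prod.ext rfl ?_
      simp only [PySem.List.pySetD_natCast]
      rw [res_update arr p rest v _ harr, dpl_snoc]
      congr 3
      rw [← hcnt v, hclen]
      simp
    · refine inv_next p bins _ v ⟨hsort, hcnt⟩ (update_append bins v hsort hclen).1 ?_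
      exact (update_append bins v hsort hclen).2
  · -- overwrite branch: binary search position
    have hfalse : (bins.isEmpty || decide (PySem.List.pyGetD bins (-1) 0 < v)) = false := by
      simpa using hcond
    simp only [Bool.or_eq_true, List.isEmpty_iff, decide_eq_true_eq, not_or] at hcond
    obtain ⟨hbe, hlast⟩ := hcond
    rw [PySem.List.pyGetD_neg_one _ _ hbe, List.getLast_eq_getElem] at hlast
    have hlenpos : 0 < bins.length := List.length_pos_iff.mpr hbe
    have hclt : countLT bins v < bins.length := by
      have := (sorted_countLT_iff bins v hsort (bins.length - 1) (by omega))
      omega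
    have hbs : bsearchA bins v 0 ((bins.length : Int) - 1) = (countLT bins v : Int) := by
      refine bsearchA_eq bins v hsort (((bins.length : Int) - 1 - 0).toNat) 0 ((bins.length : Int) - 1)
        le_rfl le_rfl (by omega) (by omega) (by intro i h hi; omega) ?_
      intro i h hi
      have : i = bins.length - 1 := by omega
      subst this; exact hlast
    refine ⟨bins.set (countLT bins v) v, ?_, ?_⟩
    · simp only [stepA, hax, hfalse, Bool.false_eq_true, if_false]
      rw [hbs]
      refine Prod.ext (by simp) ?_
      simp only [PySem.List.pySetD_natCast]
      rw [res_update arr p rest v _ harr, dpl_snoc]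
      congr 3
      rw [← hcnt v]
    · refine inv_next p bins _ v ⟨hsort, hcnt⟩ (update_set bins v hsort hclt).1 ?_
      exact (update_set bins v hsort hclt).2

-- the whole loop of A computes B's dp list
lemma loopA (arr : List Int) : ∀ k, k ≤ arr.length →
    ∃ bins, (PySem.List.pyRange 0 k 1).foldl (stepA arr) ([], List.replicate arr.length 0)
        = (bins, dpl (arr.take k) ++ List.replicate (arr.length - k) 0)
      ∧ InvA (arr.take k) bins := by
  intro k
  induction k with
  | zero =>
    intro _
    refine ⟨[], ?_, ?_⟩
    · rw [show ((0 : Nat) : Int) = 0 by simp, PySem.List.pyRange_one_eq_nil le_rfl]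
      simp [dpl, dpPair]
    · exact ⟨List.Pairwise.nil, fun v => by simp [countLT, bestPrev, dpl, dpPair]⟩
  | succ k ih =>
    intro hk
    obtain ⟨bins, heq, hinv⟩ := ih (by omega)
    have hklen : k < arr.length := by omega
    set p := arr.take k with hp
    set v := arr[k]'hklen with hv
    set rest := arr.drop (k + 1) with hrest
    have hvrest : v :: rest = arr.drop k := List.getElem_cons_drop ..
    have harr : arr = p ++ v :: rest := by rw [hvrest, hp, List.take_append_drop]
    have hplen : p.length = k := by rw [hp]; simp [List.length_take]; omega
    have htake : arr.take (k + 1) = p ++ [v] := by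
      rw [List.take_add_one, ← hp]
      congr 1
      rw [List.getElem?_eq_getElem hklen]
      rfl
    obtain ⟨bins', hstep, hinv'⟩ := stepA_preserves arr p rest v bins harr hinv
    refine ⟨bins', ?_, by rwa [htake]⟩
    rw [show (((k + 1 : Nat)) : Int) = ((k : Int) + 1) by push_cast; ring,
      PySem.List.pyRange_one_succ_right (by positivity), List.foldl_append, heq]
    simp only [List.foldl_cons, List.foldl_nil]
    rw [show (arr.length - k) = (arr.length - p.length) by rw [hplen],
      show ((k : Nat) : Int) = ((p.length : Nat) : Int) by rw [hplen], hstep, htake, hplen]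

-- ===== VERDICT (by name: the statement is the Claim_ definition above) =====
theorem calc_max_ending_spec : Claim_equal_calc_max_ending := by
  intro arr _
  unfold Spec_calc_max_ending
  obtain ⟨bins, heq, -⟩ := loopA arr arr.length le_rfl
  unfold calc_max_ending
  rw [heq, alt_eq_dpl]
  simp
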